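-- pv_equiv track=rewrite | github.com/stfc/cloud-rundeck-jobs | stackstorm/stackstorm/stackstorm-greenbone-pack/actions/src/Query.py | populate_vuln_dict
-- ===== SOURCE A (Python) =====
-- def populate_vuln_dict(query_res):
--     """
--     Group together and create a dictionary of vulnerabilities for each ip from an sql query
--     :param query_res: dictionary representing an sql query listing vulnerability information
--     :return: vuln_dict - dictionary {ip:[vulnerability dictionary list]}
--     """
--     vuln_dict = {}
--     for vuln in query_res:
--         host_ip = vuln.pop("IP")
--         if host_ip in vuln_dict.keys():
--             vuln_dict[host_ip].append(vuln)
--         else: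
--             vuln_dict[host_ip] = [vuln]
--     return vuln_dict
-- ===== SOURCE B (Python) =====
-- def populate_vuln_dict(query_res):
--     """
--     Group together and create a dictionary of vulnerabilities for each ip from an sql query.
--     Return-value equivalent to A; unlike A it does not mutate the input records
--     (A pops "IP" from each record in place).
--     """
--     ips = list(dict.fromkeys(v["IP"] for v in query_res))
--     return {
--         ip: [{k: x for k, x in v.items() if k != "IP"}
--              for v in query_res if v["IP"] == ip]
--         for ip in ips
--     }
-- ===== Notes on version B (the rewrite author's own statement) =====
-- stated objective: alternative
-- what changed: A builds the grouping incrementally in one pass, appending to a dict entry per record; B first deduplicates the IP keys in first-occurrence order and then builds each group by filtering the whole record list per key (and strips 'IP' by rebuilding the record instead of popping, so the input is not mutated).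
import Mathlib
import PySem

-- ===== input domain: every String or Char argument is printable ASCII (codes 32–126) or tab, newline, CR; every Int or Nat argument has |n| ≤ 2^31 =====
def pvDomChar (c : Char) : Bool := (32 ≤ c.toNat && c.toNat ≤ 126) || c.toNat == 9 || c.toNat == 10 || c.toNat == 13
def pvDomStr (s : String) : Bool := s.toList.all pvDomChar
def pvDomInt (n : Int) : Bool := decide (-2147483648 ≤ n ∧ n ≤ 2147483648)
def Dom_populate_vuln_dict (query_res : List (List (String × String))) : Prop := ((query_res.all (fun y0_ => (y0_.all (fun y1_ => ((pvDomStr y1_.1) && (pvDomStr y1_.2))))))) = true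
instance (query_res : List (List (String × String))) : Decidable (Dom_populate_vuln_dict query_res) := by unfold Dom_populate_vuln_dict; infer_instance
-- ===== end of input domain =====

-- B groups by deduplicated keys + per-key filtering instead of A's incremental dict fold (return value only:
-- A pops "IP" from each record in place, B does not mutate its input).

-- ===== PORT A =====
-- vuln.pop("IP"): value of the first "IP" entry ("" only where Python raises KeyError, excluded by Pre_)
def pvPopVal (vuln : List (String × String)) : String :=
  ((vuln.find? (fun p => p.1 == "IP")).map Prod.snd).getD ""

-- the record after the pop: every "IP" entry removed
def pvPopRest (vuln : List (String × String)) : List (String × String) :=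
  vuln.filter (fun p => !(p.1 == "IP"))

def populate_vuln_dict (query_res : List (List (String × String))) : List (String × List (List (String × String))) :=
  (query_res.foldl
    (fun vuln_dict vuln =>
      let host_ip := pvPopVal vuln
      let rest := pvPopRest vuln
      if vuln_dict.contains host_ip then
        vuln_dict.modify host_ip [] (fun l => l ++ [rest])   -- vuln_dict[host_ip].append(vuln)
      else
        vuln_dict.insert host_ip [rest])
    (PySem.Dict.empty : PySem.Dict String (List (List (String × String))))).items

-- ===== PORT B =====
def populate_vuln_dict_alt (query_res : List (List (String × String))) : List (String × List (List (String × String))) :=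
  let ips := PySem.List.dedup (query_res.map pvPopVal)            -- list(dict.fromkeys(v["IP"] for v in query_res))
  ips.map (fun ip =>
    (ip, (query_res.filter (fun v => pvPopVal v == ip)).map
           (fun v => v.filter (fun p => !(p.1 == "IP")))))        -- {k: x for k, x in v.items() if k != "IP"}

-- ===== PRECONDITION & SPEC =====
-- Pre_ excludes exactly the inputs where A raises KeyError: some record has no "IP" key.
def Pre_populate_vuln_dict (query_res : List (List (String × String))) : Prop :=
  (query_res.all (fun v => v.any (fun p => p.1 == "IP"))) = true
instance (query_res : List (List (String × String))) : Decidable (Pre_populate_vuln_dict query_res) := by unfold Pre_populate_vuln_dict; infer_instance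

def pvWitness_populate_vuln_dict : (List (List (String × String))) :=
  [[("IP", "10.0.0.1"), ("sev", "high")], [("IP", "10.0.0.2")], [("IP", "10.0.0.1"), ("x", "y")]]

def Spec_populate_vuln_dict (query_res : List (List (String × String))) (out : List (String × List (List (String × String)))) : Prop := out = populate_vuln_dict_alt query_res
instance (query_res : List (List (String × String))) (out : List (String × List (List (String × String)))) : Decidable (Spec_populate_vuln_dict query_res out) := by unfold Spec_populate_vuln_dict; infer_instance

-- ===== CLAIM (what is proved, stated in full; the proofs are below) =====
def Claim_equal_populate_vuln_dict : Prop := ∀ (query_res : List (List (String × String))), Dom_populate_vuln_dict query_res → Pre_populate_vuln_dict query_res → Spec_populate_vuln_dict query_res (populate_vuln_dict query_res)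

-- ===== LEMMAS AND PROOFS =====

-- A's branch (append if present, start [rest] if not) IS Dict.modify with default []
lemma stepA_eq_modify (d : PySem.Dict String (List (List (String × String)))) (k : String)
    (x : List (String × String)) :
    (if d.contains k then d.modify k [] (fun l => l ++ [x]) else d.insert k [x])
      = d.modify k [] (fun l => l ++ [x]) := by
  by_cases h : d.contains k = true
  · simp [h]
  · simp only [Bool.not_eq_true] at h
    simp [PySem.Dict.modify, PySem.Dict.getD_of_not_contains, h]

-- A's whole loop as one modify-fold over (key, stripped record) pairs
lemma foldA_eq (query_res : List (List (String × String))) :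
    populate_vuln_dict query_res =
      ((query_res.map (fun v => (pvPopVal v, pvPopRest v))).foldl
        (fun d p => d.modify p.1 [] (fun l => l ++ [p.2]))
        (PySem.Dict.empty : PySem.Dict String (List (List (String × String))))).items := by
  unfold populate_vuln_dict
  rw [List.foldl_map]
  congr 1
  apply PySem.List.foldl_congr_mem
  intro d v _
  exact stepA_eq_modify d (pvPopVal v) (pvPopRest v)

-- ===== VERDICT (by name: the statement is the Claim_ definition above) =====
theorem populate_vuln_dict_spec : Claim_equal_populate_vuln_dict := by
  intro query_res _ _
  unfold Spec_populate_vuln_dict populate_vuln_dict_alt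
  rw [foldA_eq]
  set pairs := query_res.map (fun v => (pvPopVal v, pvPopRest v)) with hpairs
  set D := pairs.foldl (fun d p => d.modify p.1 [] (fun l => l ++ [p.2]))
        (PySem.Dict.empty : PySem.Dict String (List (List (String × String)))) with hD
  have hnd : D.keys.Nodup := by
    rw [hD]
    exact PySem.Dict.nodup_keys_foldl_modify_key pairs Prod.fst []
      (fun _ p => (fun l => l ++ [p.2])) _ (by simp)
  rw [PySem.Dict.items_eq_map_keys D hnd []]
  have hkeys : D.keys = PySem.List.dedup (query_res.map pvPopVal) := by
    rw [hD]
    rw [PySem.Dict.keys_foldl_modify_key pairs Prod.fst []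
      (fun _ p => (fun l => l ++ [p.2])) _]
    simp [hpairs, PySem.Set.update, PySem.Set.ofList_eq_foldl, PySem.Dict.keys_empty,
      PySem.List.dedup_eq_ofList, List.map_map, Function.comp_def]
  rw [hkeys]
  apply List.map_congr_left
  intro ip _
  have hget : D.getD ip [] = (pairs.filter (fun p => p.1 == ip)).map (·.2) := by
    rw [hD]
    simpa using PySem.Dict.getD_foldl_modify_append pairs
      (PySem.Dict.empty : PySem.Dict String (List (List (String × String)))) ip
  rw [hget, hpairs, List.filter_map, List.map_map]
  simp [Function.comp_def, pvPopRest]
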